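-- pv_equiv track=rewrite | github.com/penguin-coding/recreational-mathematics | Project Euler Python/problem40.py | get_length_word
-- ===== SOURCE A (Python) =====
-- def get_length_word(q):
--     # purpose : calculates the number of characters in the infinite word written
--     #           with the numbers 1 through q
--     # input   : q, a positive integer
--     # output  : a positive integer
--
--     length = 0
--
--     while(q>=1):
--         order = len(str(q))
--         # The number of numbers in the current order:
--         value_in_order = q - (10**(order-1) - 1)
--         length += value_in_order*order
--         q -= value_in_order
--
--     return(length)
-- ===== SOURCE B (Python) =====
-- def get_length_word(q):
--     # closed form: with k digits in q, the concatenation of 1..q has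
--     # (q+1)*k - (10**k - 1)//9 characters (repunit subtraction)
--     if q < 1:
--         return 0
--     k = len(str(q))
--     return (q + 1) * k - (10**k - 1) // 9
-- ===== Notes on version B (the rewrite author's own statement) =====
-- stated objective: simpler
-- what changed: replaces A's order-by-order subtracting loop with the single closed-form expression (q+1)*k - (10**k-1)//9 where k = len(str(q)), guarded by q < 1 -> 0.
import Mathlib
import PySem

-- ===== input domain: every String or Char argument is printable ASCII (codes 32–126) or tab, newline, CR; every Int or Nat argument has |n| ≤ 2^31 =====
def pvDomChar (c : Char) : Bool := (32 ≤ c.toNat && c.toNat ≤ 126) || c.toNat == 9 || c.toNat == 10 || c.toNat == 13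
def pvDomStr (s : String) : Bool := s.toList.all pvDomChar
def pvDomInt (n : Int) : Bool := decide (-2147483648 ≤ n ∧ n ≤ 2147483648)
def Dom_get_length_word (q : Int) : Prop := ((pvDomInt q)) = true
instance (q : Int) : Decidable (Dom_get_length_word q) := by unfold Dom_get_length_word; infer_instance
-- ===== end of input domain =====

-- B replaces A's order-by-order loop by the closed form (q+1)*k - (10**k-1)//9, k = len(str(q)); objective: simpler.

-- Digit-length facts about Nat.toDigits (the meaning of len(str(q)) for q ≥ 0); the
-- port of A needs pvA_dec for termination, so these sit above it.
lemma pvLenLt10 (n : Nat) (h : n < 10) : (Nat.toDigits 10 n).length = 1 := by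
  interval_cases n <;> decide

lemma pvTdcLen : ∀ (n : Nat), ∀ (f : Nat) (l : List Char), n < f →
    (Nat.toDigitsCore 10 f n l).length = (Nat.toDigits 10 n).length + l.length := by
  intro n
  induction n using Nat.strong_induction_on with
  | _ n ih =>
    intro f l hf
    match f with
    | g+1 =>
      by_cases h : n / 10 = 0
      · have hn : n < 10 := by omega
        simp [Nat.toDigitsCore, h, pvLenLt10 n hn]
        omega
      · have hlt : n / 10 < n := Nat.div_lt_self (by omega) (by omega)
        simp only [Nat.toDigitsCore, h, if_false]
        rw [ih (n/10) hlt g _ (by omega)]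
        conv_rhs => rw [Nat.toDigits]
        simp only [Nat.toDigitsCore, h, if_false]
        rw [ih (n/10) hlt n _ hlt]
        simp
        omega

lemma pvLenStep (n : Nat) (h : 10 ≤ n) :
    (Nat.toDigits 10 n).length = (Nat.toDigits 10 (n/10)).length + 1 := by
  have hne : n / 10 ≠ 0 := by omega
  conv_lhs => rw [Nat.toDigits]
  simp only [Nat.toDigitsCore, hne, if_false]
  rw [pvTdcLen (n/10) n _ (Nat.div_lt_self (by omega) (by omega))]
  simp

lemma pvLenPos (n : Nat) : 1 ≤ (Nat.toDigits 10 n).length := by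
  by_cases h : n < 10
  · rw [pvLenLt10 n h]
  · rw [pvLenStep n (by omega)]; omega

lemma pvLenBounds : ∀ (n : Nat), 1 ≤ n →
    10 ^ ((Nat.toDigits 10 n).length - 1) ≤ n ∧ n < 10 ^ (Nat.toDigits 10 n).length := by
  intro n
  induction n using Nat.strong_induction_on with
  | _ n ih =>
    intro hn
    by_cases h : n < 10
    · rw [pvLenLt10 n h]
      refine ⟨by simpa using hn, by simpa using h⟩
    · have h10 : 10 ≤ n := by omega
      have hq : 1 ≤ n / 10 := by omega
      obtain ⟨lo, hi⟩ := ih (n/10) (Nat.div_lt_self (by omega) (by omega)) hq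
      rw [pvLenStep n h10]
      set L := (Nat.toDigits 10 (n/10)).length with hL
      have hLpos := pvLenPos (n/10)
      constructor
      · have : 10 ^ (L - 1 + 1) ≤ 10 * (n / 10) := by
          rw [pow_succ]; omega
        have hE : L - 1 + 1 = L := by omega
        rw [hE] at this
        simp only [Nat.add_sub_cancel]
        omega
      · have h1 : n < 10 * (n/10) + 10 := by omega
        have h2 : 10 * (n/10) + 10 ≤ 10 * 10 ^ L := by omega
        calc n < 10 * (n/10) + 10 := h1
          _ ≤ 10 * 10 ^ L := h2
          _ = 10 ^ (L + 1) := by rw [pow_succ]; ring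

-- len(str(q)) for 0 ≤ q is the length of Nat.toDigits 10 q.toNat
lemma pvDigLen (q : Int) (h : 0 ≤ q) :
    PySem.Str.len (PySem.Int.toStr q) = ((Nat.toDigits 10 q.toNat).length : Int) := by
  rw [PySem.Str.len_eq, PySem.Int.toList_toStr]
  simp [PySem.Int.toChars, not_lt.mpr h]

-- 10^(len(str(q))-1) - 1 < q for q ≥ 1: A's loop strictly decreases q (termination)
lemma pvA_dec (q : Int) (h : 1 ≤ q) :
    (10:Int) ^ (PySem.Str.len (PySem.Int.toStr q) - 1).toNat - 1 < q := by
  have h0 : (0:Int) ≤ q := by omega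
  have hd := pvDigLen q h0
  have hp := pvLenPos q.toNat
  have hb := (pvLenBounds q.toNat (by omega)).1
  have he : (PySem.Str.len (PySem.Int.toStr q) - 1).toNat
      = (Nat.toDigits 10 q.toNat).length - 1 := by omega
  rw [he]
  have hc : ((10 ^ ((Nat.toDigits 10 q.toNat).length - 1) : Nat) : Int) ≤ (q.toNat : Int) :=
    Int.ofNat_le.mpr hb
  push_cast at hc
  omega

-- ===== PORT A =====
def get_length_word_go (q : Int) (length : Int) : Int :=
  if h : 1 ≤ q then
    let order : Int := PySem.Str.len (PySem.Int.toStr q)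
    let value_in_order : Int := q - ((10:Int) ^ (order - 1).toNat - 1)
    get_length_word_go (q - value_in_order) (length + value_in_order * order)
  else length
termination_by q.toNat
decreasing_by
  have hlt := pvA_dec q h
  omega

def get_length_word (q : Int) : Int := get_length_word_go q 0

-- ===== PORT B =====
def get_length_word_alt (q : Int) : Int :=
  if q < 1 then 0
  else
    let k : Int := PySem.Str.len (PySem.Int.toStr q)
    (q + 1) * k - PySem.Int.floordiv ((10:Int) ^ k.toNat - 1) 9

-- ===== PRECONDITION & SPEC =====
def Spec_get_length_word (q : Int) (out : Int) : Prop := out = get_length_word_alt q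
instance (q : Int) (out : Int) : Decidable (Spec_get_length_word q out) := by unfold Spec_get_length_word; infer_instance

-- ===== CLAIM (what is proved, stated in full; the proofs are below) =====
def Claim_equal_get_length_word : Prop := ∀ (q : Int), Dom_get_length_word q → Spec_get_length_word q (get_length_word q)

-- ===== LEMMAS AND PROOFS =====
lemma pvNineDvd : ∀ (k : Nat), (9:Int) ∣ 10 ^ k - 1 := by
  intro k
  induction k with
  | zero => simp
  | succ k ih =>
    obtain ⟨c, hc⟩ := ih
    exact ⟨10 * c + 1, by rw [pow_succ]; linarith⟩

lemma pvFloorExact (z c : Int) (h : z = 9 * c) : PySem.Int.floordiv z 9 = c := by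
  rw [PySem.Int.floordiv_eq_ediv_of_pos (by omega), h, Int.mul_ediv_cancel_left _ (by omega)]

-- len(str(10^k - 1)) = k for k ≥ 1 (the all-nines number has k digits)
lemma pvLenRepNine : ∀ (k : Nat), 1 ≤ k → (Nat.toDigits 10 (10 ^ k - 1)).length = k := by
  intro k
  induction k with
  | zero => omega
  | succ k ih =>
    intro _
    by_cases hk : k = 0
    · subst hk; decide
    · have hp : (10:Nat) ≤ 10 ^ k := by
        calc (10:Nat) = 10 ^ 1 := (pow_one 10).symm
        _ ≤ 10 ^ k := Nat.pow_le_pow_right (by omega) (by omega)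
      have hs : 10 ^ (k+1) = 10 * 10 ^ k := by rw [pow_succ]; ring
      have h10 : 10 ≤ 10 ^ (k+1) - 1 := by omega
      rw [pvLenStep _ h10]
      have hdiv : (10 ^ (k+1) - 1) / 10 = 10 ^ k - 1 := by omega
      rw [hdiv, ih (by omega)]

lemma pvAltNeg (q : Int) (h : q < 1) : get_length_word_alt q = 0 := by
  rw [get_length_word_alt, if_pos h]

lemma pvAltPos (q : Int) (h : 1 ≤ q) :
    get_length_word_alt q = (q + 1) * ((Nat.toDigits 10 q.toNat).length : Int)
      - PySem.Int.floordiv ((10:Int) ^ (Nat.toDigits 10 q.toNat).length - 1) 9 := by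
  rw [get_length_word_alt, if_neg (by omega : ¬ q < 1)]
  have hd := pvDigLen q (by omega)
  simp only [hd]
  have hk : (((Nat.toDigits 10 q.toNat).length : Int)).toNat
      = (Nat.toDigits 10 q.toNat).length := by omega
  rw [hk]

-- the loop with accumulator equals acc + the closed form
lemma pvGo : ∀ (n : Nat) (q acc : Int), q.toNat = n →
    get_length_word_go q acc = acc + get_length_word_alt q := by
  intro n
  induction n using Nat.strong_induction_on with
  | _ n ih =>
    intro q acc hq
    rw [get_length_word_go]
    by_cases h : 1 ≤ q
    · simp only [dif_pos h]
      have h0 : (0:Int) ≤ q := by omega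
      have hd := pvDigLen q h0
      set LN := (Nat.toDigits 10 q.toNat).length with hLN
      have hp : 1 ≤ LN := pvLenPos q.toNat
      obtain ⟨hlo, hhi⟩ := pvLenBounds q.toNat (by omega)
      rw [hd]
      have he : (((LN:Int)) - 1).toNat = LN - 1 := by omega
      rw [he]
      have hqq : q - (q - ((10:Int) ^ (LN-1) - 1)) = (10:Int) ^ (LN-1) - 1 := by ring
      rw [hqq]
      have hcast : ((10 ^ (LN - 1) : Nat) : Int) = (10:Int) ^ (LN - 1) := by push_cast; rfl
      have hdec : ((10:Int) ^ (LN-1) - 1).toNat < n := by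
        have hc : ((10 ^ (LN - 1) : Nat) : Int) ≤ (q.toNat : Int) := Int.ofNat_le.mpr hlo
        omega
      rw [ih _ hdec _ _ rfl, pvAltPos q h]
      rw [← hLN]
      by_cases h1 : LN = 1
      · rw [pvAltNeg _ (by rw [h1]; norm_num), h1]
        rw [pvFloorExact _ 1 (by norm_num)]
        norm_num
      · have h2 : 2 ≤ LN := by omega
        have hpow10 : (10:Nat) ≤ 10 ^ (LN - 1) := by
          calc (10:Nat) = 10 ^ 1 := (pow_one 10).symm
          _ ≤ 10 ^ (LN - 1) := Nat.pow_le_pow_right (by omega) (by omega)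
        have hq'1 : (1:Int) ≤ (10:Int) ^ (LN-1) - 1 := by omega
        rw [pvAltPos _ hq'1]
        have hq'nat : ((10:Int) ^ (LN-1) - 1).toNat = 10 ^ (LN-1) - 1 := by omega
        rw [hq'nat, pvLenRepNine (LN-1) (by omega)]
        obtain ⟨c', hc'⟩ := pvNineDvd (LN - 1)
        rw [pvFloorExact _ c' hc']
        have hs : (10:Int) ^ LN = 10 * (10:Int) ^ (LN - 1) := by
          conv_lhs => rw [show LN = (LN - 1) + 1 from by omega]
          rw [pow_succ]; ring
        rw [pvFloorExact _ ((10:Int) ^ (LN-1) + c') (by rw [hs]; omega)]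
        have hDc : ((LN - 1 : Nat) : Int) = (LN:Int) - 1 := by omega
        rw [hDc]
        ring
    · simp only [dif_neg h]
      rw [pvAltNeg q (by omega)]
      omega

-- ===== VERDICT (by name: the statement is the Claim_ definition above) =====
theorem get_length_word_spec : Claim_equal_get_length_word := by
  intro q _
  unfold Spec_get_length_word get_length_word
  rw [pvGo q.toNat q 0 rfl]
  omega
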